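-- pv_equiv track=rewrite | github.com/YangLingSanShan/Code-Check | test_codes/test2/std.py | solve
-- ===== SOURCE A (Python) =====
-- def solve(s):
--     t = {0: 1}
--
--     MOD = 10 ** 9 + 7
--     res = 0
--     cur = 0
--     for ind, i in enumerate(s):
--         if i == '1':
--             cur -= 1
--         else:
--             cur += 1
--
--         res += (len(s) - ind) * t.get(cur, 0)
--         res %= MOD
--         t[cur] = t.get(cur, 0) + ind + 2
--
--     return res
-- ===== SOURCE B (Python) =====
-- def solve(s):
--     n = len(s)
--     MOD = 10 ** 9 + 7
--     # prefix-balance array: P[m] = (#non-'1') - (#'1') among the first m chars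
--     P = [0]
--     cur = 0
--     for c in s:
--         cur += -1 if c == '1' else 1
--         P.append(cur)
--     res = 0
--     for j in range(1, n + 1):
--         for k in range(j):
--             if P[k] == P[j]:
--                 res += (n - j + 1) * (k + 1)
--     return res % MOD
-- ===== Notes on version B (the rewrite author's own statement) =====
-- stated objective: alternative
-- what changed: Replaces A's single-pass running dict of balance weights by an explicit prefix-balance array followed by a pairwise double loop over all index pairs with equal balance, taking the modulus once at the end.
import Mathlib
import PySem

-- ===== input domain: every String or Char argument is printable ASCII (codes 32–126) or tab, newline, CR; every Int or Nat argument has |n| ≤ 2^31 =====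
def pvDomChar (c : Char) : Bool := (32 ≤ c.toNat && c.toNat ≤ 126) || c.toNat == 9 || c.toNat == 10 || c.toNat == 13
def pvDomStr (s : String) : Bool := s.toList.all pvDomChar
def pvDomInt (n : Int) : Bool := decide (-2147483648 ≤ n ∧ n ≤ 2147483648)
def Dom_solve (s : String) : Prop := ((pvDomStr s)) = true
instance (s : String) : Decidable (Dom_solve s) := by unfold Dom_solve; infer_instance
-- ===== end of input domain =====

-- B replaces A's single-pass dict bookkeeping by a prefix-balance array and an
-- explicit O(n^2) double loop over equal-balance index pairs (objective: alternative).

-- ===== PORT A =====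
-- loop body of A, named for the proofs; a literal step-for-step transliteration
def solveStep (n MOD : Int) (acc : Int × Int × PySem.Dict Int Int) (p : Int × Char) :
    Int × Int × PySem.Dict Int Int :=
  let cur := if p.2 = '1' then acc.2.1 - 1 else acc.2.1 + 1
  let res := acc.1 + (n - p.1) * (acc.2.2.getD cur 0)
  let res := PySem.Int.mod res MOD
  let t := acc.2.2.insert cur (acc.2.2.getD cur 0 + p.1 + 2)
  (res, cur, t)

def solve (s : String) : Int :=
  let MOD : Int := 10 ^ 9 + 7
  let n : Int := PySem.Str.len s
  ((PySem.List.enumerate s.toList 0).foldl (solveStep n MOD)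
    (0, 0, PySem.Dict.empty.insert 0 1)).1

-- ===== PORT B =====
-- building of the prefix-balance list P (append cur after each char)
def altPStep (acc : List Int × Int) (c : Char) : List Int × Int :=
  let cur := acc.2 + (if c = '1' then -1 else 1)
  (acc.1 ++ [cur], cur)

def solve_alt (s : String) : Int :=
  let n : Int := PySem.Str.len s
  let MOD : Int := 10 ^ 9 + 7
  let P : List Int := (s.toList.foldl altPStep ([0], 0)).1
  let res : Int := (PySem.List.pyRange 1 (n + 1) 1).foldl (fun res j =>
      (PySem.List.pyRange 0 j 1).foldl (fun res k =>
        if PySem.List.pyGetD P k 0 = PySem.List.pyGetD P j 0 then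
          res + (n - j + 1) * (k + 1)
        else res) res) 0
  PySem.Int.mod res MOD

-- ===== PRECONDITION & SPEC =====
def Spec_solve (s : String) (out : Int) : Prop := out = solve_alt s
instance (s : String) (out : Int) : Decidable (Spec_solve s out) := by unfold Spec_solve; infer_instance

-- ===== CLAIM (what is proved, stated in full; the proofs are below) =====
def Claim_equal_solve : Prop := ∀ (s : String), Dom_solve s → Spec_solve s (solve s)

-- ===== LEMMAS AND PROOFS =====

-- step of the balance
def stp (c : Char) : Int := if c = '1' then -1 else 1

-- the mathematical prefix-balance list
def prefs : Int → List Char → List Int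
  | cur, [] => [cur]
  | cur, c :: tl => cur :: prefs (cur + stp c) tl

-- Tsum P v m = sum of weights (k+1) over positions k ≤ m with balance v
def Tsum (P : List Int) (v : Int) (m : Nat) : Int :=
  ((List.range (m + 1)).map (fun k => if P.getD k 0 = v then (k : Int) + 1 else 0)).sum

-- total after m loop iterations of A (before the running modulus)
def Tot (P : List Int) (n : Int) (m : Nat) : Int :=
  ((List.range m).map (fun j => (n - j) * Tsum P (P.getD (j + 1) 0) j)).sum

theorem prefs_getD_zero (cur : Int) (l : List Char) : (prefs cur l).getD 0 0 = cur := by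
  cases l <;> simp [prefs]

theorem prefs_getD_succ (l : List Char) (cur : Int) (i : Nat) (hi : i < l.length) :
    (prefs cur l).getD (i + 1) 0 = (prefs cur l).getD i 0 + stp (l.getD i ' ') := by
  induction l generalizing cur i with
  | nil => simp at hi
  | cons c tl ih =>
    cases i with
    | zero => cases tl <;> simp [prefs]
    | succ i => simpa [prefs] using ih (cur + stp c) i (by simpa using hi)

theorem prefs_head (cur : Int) (l : List Char) : (prefs cur l)[0]?.getD 0 = cur := by
  cases l <;> simp [prefs]

theorem Tsum_zero (P : List Int) (v : Int) : Tsum P v 0 = if P.getD 0 0 = v then 1 else 0 := by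
  simp [Tsum, List.getD_eq_getElem?_getD]

theorem Tot_succ (P : List Int) (n : Int) (m : Nat) :
    Tot P n (m + 1) = Tot P n m + (n - m) * Tsum P (P.getD (m + 1) 0) m := by
  simp [Tot, List.range_succ]

theorem Tsum_succ (P : List Int) (v : Int) (m : Nat) :
    Tsum P v (m + 1) = Tsum P v m + (if P.getD (m + 1) 0 = v then (m : Int) + 2 else 0) := by
  simp [Tsum, List.range_succ]
  split_ifs <;> ring

theorem mod_mod_add (a b : Int) :
    PySem.Int.mod (PySem.Int.mod a (10 ^ 9 + 7) + b) (10 ^ 9 + 7)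
      = PySem.Int.mod (a + b) (10 ^ 9 + 7) := by
  rw [PySem.Int.mod_eq_emod_of_pos (by norm_num), PySem.Int.mod_eq_emod_of_pos (by norm_num),
     PySem.Int.mod_eq_emod_of_pos (by norm_num), Int.emod_add_emod]

-- A's loop invariant
theorem A_loop (rest : List Char) (m : Nat) (res cur : Int) (t : PySem.Dict Int Int)
    (P : List Int) (n : Int)
    (hstep : ∀ i, i < rest.length → P.getD (m + i + 1) 0 = P.getD (m + i) 0 + stp (rest.getD i ' '))
    (hcur : cur = P.getD m 0)
    (ht : ∀ v, t.getD v 0 = Tsum P v m)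
    (hres : res = PySem.Int.mod (Tot P n m) (10 ^ 9 + 7)) :
    ((PySem.List.enumerate rest (m : Int)).foldl (solveStep n (10 ^ 9 + 7)) (res, cur, t)).1
      = PySem.Int.mod (Tot P n (m + rest.length)) (10 ^ 9 + 7) := by
  induction rest generalizing m res cur t with
  | nil => simpa [PySem.List.enumerate_nil] using hres
  | cons c tl ih =>
    rw [PySem.List.enumerate_cons, List.foldl_cons]
    have h0 := hstep 0 (by simp)
    simp only [Nat.add_zero, List.getD_cons_zero] at h0
    have hcur' : (if c = '1' then cur - 1 else cur + 1) = P.getD (m + 1) 0 := by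
      rw [h0, hcur, stp]; split_ifs <;> ring
    have hcast : ((m : Int) + 1) = ((m + 1 : Nat) : Int) := by push_cast; ring
    have := ih (m + 1)
      (PySem.Int.mod (res + (n - m) * (t.getD (if c = '1' then cur - 1 else cur + 1) 0)) (10 ^ 9 + 7))
      (if c = '1' then cur - 1 else cur + 1)
      (t.insert (if c = '1' then cur - 1 else cur + 1)
        (t.getD (if c = '1' then cur - 1 else cur + 1) 0 + m + 2))
      (fun i hi => by
        have := hstep (i + 1) (by simpa using Nat.succ_lt_succ hi)
        simpa [Nat.add_right_comm, Nat.add_assoc] using this)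
      hcur'
      (fun v => by
        simp only [PySem.Dict.getD_insert, ht, hcur', Tsum_succ]
        by_cases hv : v = P.getD (m + 1) 0
        · rw [if_pos hv, if_pos hv.symm, hv]; ring
        · rw [if_neg hv, if_neg (fun h => hv h.symm), add_zero])
      (by
        rw [hres, mod_mod_add, ht, hcur', Tot_succ])
    simp only [solveStep, hcast] at this ⊢
    have harg : m + (c :: tl).length = m + 1 + tl.length := by
      simp only [List.length_cons]; omega
    rw [harg]
    exact this

-- A computes mod (Tot P n n)
theorem solve_eq (s : String) :
    solve s = PySem.Int.mod (Tot (prefs 0 s.toList) (s.toList.length : Int) s.toList.length)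
      (10 ^ 9 + 7) := by
  have h := A_loop s.toList 0 0 0 (PySem.Dict.empty.insert 0 1) (prefs 0 s.toList)
    (s.toList.length : Int)
    (fun i hi => by simpa using prefs_getD_succ s.toList 0 i hi)
    (by simp [prefs_head])
    (fun v => by
      rw [PySem.Dict.getD_insert, Tsum_zero, prefs_getD_zero]
      by_cases hv : v = 0
      · rw [if_pos hv, if_pos hv.symm]
      · rw [if_neg hv, if_neg (fun h => hv h.symm), PySem.Dict.getD_empty])
    (by
      rw [PySem.Int.mod_eq_emod_of_pos (show (0:Int) < 10 ^ 9 + 7 by norm_num)]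
      simp [Tot])
  simpa [solve, PySem.Str.len_eq] using h

-- generic conditional-accumulation fold = init + sum
theorem foldl_ite_add {α : Type} (p : α → Prop) [DecidablePred p] (g : α → Int)
    (l : List α) (init : Int) :
    l.foldl (fun r x => if p x then r + g x else r) init
      = init + (l.map (fun x => if p x then g x else 0)).sum := by
  induction l generalizing init with
  | nil => simp
  | cons a tl ih =>
    simp only [List.foldl_cons, List.map_cons, List.sum_cons, ih]
    split_ifs <;> ring

theorem foldl_add {α : Type} (g : α → Int) (l : List α) (init : Int) :
    l.foldl (fun r x => r + g x) init = init + (l.map g).sum := by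
  induction l generalizing init with
  | nil => simp
  | cons a tl ih => simp [ih]; ring

-- B's P-building fold produces prefs
theorem fold_P (l : List Char) (xs : List Int) (cur : Int) :
    (l.foldl altPStep (xs ++ [cur], cur)).1 = xs ++ prefs cur l := by
  induction l generalizing xs cur with
  | nil => simp [prefs]
  | cons c tl ih =>
    have : altPStep (xs ++ [cur], cur) c = ((xs ++ [cur]) ++ [cur + stp c], cur + stp c) := by
      simp [altPStep, stp]
    rw [List.foldl_cons, this, ih]
    simp [prefs]

-- B's inner loop for a fixed j = j' + 1 (Nat) equals one term of Tot
theorem inner_loop (P : List Int) (n : Int) (j' : Nat) (res : Int) :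
    (PySem.List.pyRange 0 ((1 : Int) + j') 1).foldl (fun res k =>
        if PySem.List.pyGetD P k 0 = PySem.List.pyGetD P ((1 : Int) + j') 0 then
          res + (n - ((1 : Int) + j') + 1) * (k + 1)
        else res) res
      = res + (n - j') * Tsum P (P.getD (j' + 1) 0) j' := by
  have hj : ((1 : Int) + j') = ((j' + 1 : Nat) : Int) := by push_cast; ring
  rw [hj, PySem.List.pyRange_zero_nat]
  rw [foldl_ite_add (fun k => PySem.List.pyGetD P k 0 = PySem.List.pyGetD P ((j' + 1 : Nat) : Int) 0)
    (fun k => (n - ((j' + 1 : Nat) : Int) + 1) * (k + 1))]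
  congr 1
  rw [List.map_map]
  have heq : ∀ k : Nat, ((fun k => if PySem.List.pyGetD P k 0 = PySem.List.pyGetD P ((j' + 1 : Nat) : Int) 0 then (n - ((j' + 1 : Nat) : Int) + 1) * (k + 1) else 0) ∘ (fun k : Nat => (k : Int))) k
      = (n - j') * (if P.getD k 0 = P.getD (j' + 1) 0 then (k : Int) + 1 else 0) := by
    intro k
    simp only [Function.comp, PySem.List.pyGetD_natCast]
    split_ifs with h
    · push_cast; ring
    · ring
  rw [List.map_congr_left (fun k _ => heq k)]
  simp only [Tsum]
  rw [← List.sum_map_mul_left]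

-- B computes mod (Tot P n n) too
theorem foldl_fun_congr {α β : Type} (f g : α → β → α) (l : List β) (init : α)
    (h : ∀ a b, f a b = g a b) : l.foldl f init = l.foldl g init := by
  induction l generalizing init with
  | nil => rfl
  | cons x xs ih => simp only [List.foldl_cons, h, ih]

theorem solve_alt_eq (s : String) :
    solve_alt s = PySem.Int.mod (Tot (prefs 0 s.toList) (s.toList.length : Int) s.toList.length)
      (10 ^ 9 + 7) := by
  set l := s.toList with hl
  set n : Int := (l.length : Int) with hn
  have hP : (l.foldl altPStep ([0], 0)).1 = prefs 0 l := by
    simpa using fold_P l [] 0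
  simp only [solve_alt, PySem.Str.len_eq, ← hl, ← hn, hP]
  congr 1
  -- outer loop
  have hrange : PySem.List.pyRange 1 (n + 1) 1
      = (List.range l.length).map (fun j' : Nat => (1 : Int) + j') := by
    rw [PySem.List.pyRange_one]
    congr 2
    omega
  rw [hrange, List.foldl_map]
  rw [foldl_fun_congr _
    (fun (res : Int) (j' : Nat) =>
      res + (n - j') * Tsum (prefs 0 l) ((prefs 0 l).getD (j' + 1) 0) j')
    _ 0 (fun res j' => inner_loop (prefs 0 l) n j' res)]
  rw [foldl_add (fun j' : Nat => (n - j') * Tsum (prefs 0 l) ((prefs 0 l).getD (j' + 1) 0) j')]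
  simp [Tot]

-- ===== VERDICT (by name: the statement is the Claim_ definition above) =====
theorem solve_spec : Claim_equal_solve := by
  intro s _
  unfold Spec_solve
  rw [solve_eq, solve_alt_eq]
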